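-- pv_equiv track=rewrite | github.com/Dyrati/ARM-Debugger | Components/Disassembler.py | rlist
-- ===== SOURCE A (Python) =====
-- def rlist(number):
--     out = []
--     state = 0
--     for i in range(16):
--         if number & 2**i:
--             sep = ", "
--             if state > 1: out.pop(); sep = "-"
--             out.append(f"{sep}r{i}")
--             state += 1
--         else: state = 0
--     return "".join(out)[2:]
-- ===== SOURCE B (Python) =====
-- def rlist(number):
--     # Two-phase: collect maximal runs of consecutive set bits, then format them.
--     runs = []
--     for i in range(16):
--         if number & (1 << i):
--             if runs and runs[-1][1] == i - 1:
--                 runs[-1] = (runs[-1][0], i)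
--             else:
--                 runs.append((i, i))
--     tokens = []
--     for (s, e) in runs:
--         if e - s + 1 >= 3:
--             tokens.append(f"r{s}-r{e}")
--         else:
--             for j in range(s, e + 1):
--                 tokens.append(f"r{j}")
--     return ", ".join(tokens)
-- ===== Notes on version B (the rewrite author's own statement) =====
-- stated objective: simpler
-- what changed: Replaces A's single emit-and-pop pass (which patches already-emitted separator strings) by a two-phase structure: first collect maximal runs of consecutive set bits as (start,end) pairs, then format each run (collapsing only runs of length >= 3) and join the tokens with ', '.
import Mathlib
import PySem

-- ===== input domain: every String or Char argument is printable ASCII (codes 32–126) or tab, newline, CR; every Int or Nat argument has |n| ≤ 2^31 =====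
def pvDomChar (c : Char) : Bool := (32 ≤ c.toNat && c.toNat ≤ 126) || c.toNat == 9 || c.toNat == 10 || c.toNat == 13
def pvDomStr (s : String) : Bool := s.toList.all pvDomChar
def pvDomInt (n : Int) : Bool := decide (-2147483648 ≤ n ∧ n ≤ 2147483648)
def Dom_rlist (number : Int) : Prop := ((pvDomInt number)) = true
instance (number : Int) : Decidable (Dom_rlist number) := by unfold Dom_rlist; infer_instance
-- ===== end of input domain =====

-- B replaces A's emit-and-pop single pass by a two-phase structure (collect runs of set
-- bits, then format them); objective: simpler decomposition, same behaviour.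

-- ===== PORT A =====
def rlistStepA (number : Int) (acc : List String × Int) (i : Int) : List String × Int :=
  if PySem.Int.band number (2 ^ i.toNat) != 0 then
    -- sep = ", "; if state > 1: out.pop(); sep = "-"; out.append(f"{sep}r{i}"); state += 1
    let out := if acc.2 > 1 then acc.1.dropLast else acc.1
    let sep := if acc.2 > 1 then "-" else ", "
    (out ++ [sep ++ "r" ++ PySem.Int.toStr i], acc.2 + 1)
  else (acc.1, 0)

def rlist (number : Int) : String :=
  PySem.Str.slice (PySem.Str.join ""
    ((PySem.List.pyRange 0 16 1).foldl (rlistStepA number) ([], 0)).1)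
    (some 2) none   -- "".join(out)[2:]

-- ===== PORT B =====
def rlistRunsStep (number : Int) (runs : List (Int × Int)) (i : Int) : List (Int × Int) :=
  if PySem.Int.band number (1 <<< i.toNat) != 0 then
    match runs.getLast? with               -- runs and runs[-1][1] == i - 1
    | some (s, e) =>
      if e == i - 1 then runs.dropLast ++ [(s, i)] else runs ++ [(i, i)]
    | none => runs ++ [(i, i)]
  else runs

-- tokens contributed by one run (s, e): the body of B's second loop
def rlistToken (s e : Int) : List String :=
  if e - s + 1 ≥ 3 then ["r" ++ PySem.Int.toStr s ++ "-r" ++ PySem.Int.toStr e]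
  else (PySem.List.pyRange s (e + 1) 1).map (fun j => "r" ++ PySem.Int.toStr j)

def rlist_alt (number : Int) : String :=
  PySem.Str.join ", "
    (((PySem.List.pyRange 0 16 1).foldl (rlistRunsStep number) []).foldl
      (fun toks r => toks ++ rlistToken r.1 r.2) [])

-- ===== PRECONDITION & SPEC =====
def Spec_rlist (number : Int) (out : String) : Prop := out = rlist_alt number
instance (number : Int) (out : String) : Decidable (Spec_rlist number out) := by unfold Spec_rlist; infer_instance

-- ===== CLAIM (what is proved, stated in full; the proofs are below) =====
def Claim_equal_rlist : Prop := ∀ (number : Int), Dom_rlist number → Spec_rlist number (rlist number)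

-- ===== LEMMAS AND PROOFS =====

-- What A's out-list looks like for one completed run (s, e): one element for a singleton,
-- two elements (the second patched to "-r…" once the run has length ≥ 3).
def emitA (s e : Int) : List String :=
  if e = s then [", " ++ "r" ++ PySem.Int.toStr s]
  else if e = s + 1 then
    [", " ++ "r" ++ PySem.Int.toStr s, ", " ++ "r" ++ PySem.Int.toStr e]
  else [", " ++ "r" ++ PySem.Int.toStr s, "-" ++ "r" ++ PySem.Int.toStr e]

-- Loop invariant tying A's (out, state) to B's runs after the bits < k are processed.
def LoopInv (k : Int) (acc : List String × Int) (runs : List (Int × Int)) : Prop :=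
  acc.1 = runs.flatMap (fun r => emitA r.1 r.2) ∧
  (∀ r ∈ runs, r.1 ≤ r.2 ∧ r.2 ≤ k - 1) ∧
  acc.2 = (match runs.getLast? with
           | some se => if se.2 = k - 1 then se.2 - se.1 + 1 else 0
           | none => 0)

lemma step_inv (number k : Int) (acc : List String × Int) (runs : List (Int × Int))
    (h : LoopInv k acc runs) :
    LoopInv (k + 1) (rlistStepA number acc k) (rlistRunsStep number runs k) := by
  obtain ⟨h1, h2, h3⟩ := h
  have hpow : (((1 <<< k.toNat : Nat)) : Int) = 2 ^ k.toNat := by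
    simp [Nat.shiftLeft_eq]
  unfold rlistStepA rlistRunsStep
  rw [hpow]
  by_cases hb : PySem.Int.band number (2 ^ k.toNat) != 0
  · -- bit k is set
    rw [if_pos hb, if_pos hb]
    cases hl : runs.getLast? with
    | none =>
      have hrn : runs = [] := by
        cases runs with
        | nil => rfl
        | cons x xs => simp [List.getLast?_concat] at hl
      subst hrn
      have hst : acc.2 = 0 := by simpa using h3
      have hgt : ¬ acc.2 > 1 := by omega
      rw [if_neg hgt, if_neg hgt]
      show LoopInv (k + 1) (acc.1 ++ [", " ++ "r" ++ PySem.Int.toStr k], acc.2 + 1)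
        ([] ++ [(k, k)])
      refine ⟨?_, ?_, ?_⟩
      · simp only [List.flatMap_nil] at h1
        rw [h1]
        simp [emitA]
      · intro r hr; simp at hr; subst hr; exact ⟨le_refl k, by omega⟩
      · show acc.2 + 1 = _
        simp only [List.nil_append, List.getLast?_singleton]
        rw [if_pos (show k = k + 1 - 1 by omega)]
        omega
    | some se =>
      obtain ⟨s, e⟩ := se
      obtain ⟨l', hre⟩ := List.getLast?_eq_some_iff.mp hl
      have hdl : runs.dropLast = l' := by rw [hre]; exact List.dropLast_concat
      have hse : s ≤ e ∧ e ≤ k - 1 := h2 (s, e) (by rw [hre]; simp)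
      have hmem' : ∀ r ∈ l', r.1 ≤ r.2 ∧ r.2 ≤ k - 1 := by
        intro r hr; exact h2 r (by rw [hre]; simp [hr])
      have hst : acc.2 = if e = k - 1 then e - s + 1 else 0 := by simpa [hl] using h3
      simp only [hl]
      by_cases he : e = k - 1
      · have hbeq : (e == k - 1) = true := by simpa using he
        rw [if_pos hbeq]
        by_cases hes : e = s
        · -- run of length 1 so far: state = 1, no pop
          have hstv : acc.2 = 1 := by rw [hst, if_pos he]; omega
          have hgt : ¬ acc.2 > 1 := by omega
          rw [if_neg hgt, if_neg hgt]
          show LoopInv (k + 1) (acc.1 ++ [", " ++ "r" ++ PySem.Int.toStr k], acc.2 + 1)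
            (runs.dropLast ++ [(s, k)])
          refine ⟨?_, ?_, ?_⟩
          · rw [h1, hdl, hre]
            simp only [List.flatMap_append, List.flatMap_cons, List.flatMap_nil,
              List.append_nil, List.append_assoc]
            congr 1
            have ha : emitA s e = [", " ++ "r" ++ PySem.Int.toStr s] := by
              simp only [emitA]; rw [if_pos hes]
            have hb2 : emitA s k = [", " ++ "r" ++ PySem.Int.toStr s,
                ", " ++ "r" ++ PySem.Int.toStr k] := by
              simp only [emitA]
              rw [if_neg (show ¬ k = s by omega), if_pos (show k = s + 1 by omega)]
            rw [ha, hb2]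
            have : s = e := hes.symm
            subst this
            simp
          · intro r hr
            rw [hdl] at hr
            rcases List.mem_append.mp hr with hr | hr
            · have := hmem' r hr; exact ⟨this.1, by omega⟩
            · simp at hr; subst hr; exact ⟨by omega, by omega⟩
          · show acc.2 + 1 = _
            simp only [List.getLast?_concat]
            rw [if_pos (show k = k + 1 - 1 by omega)]
            omega
        · -- run of length ≥ 2 so far: state > 1, pop then dash
          have hstv : acc.2 = e - s + 1 := by rw [hst, if_pos he]
          have hgt : acc.2 > 1 := by omega
          rw [if_pos hgt, if_pos hgt]
          show LoopInv (k + 1)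
            (acc.1.dropLast ++ ["-" ++ "r" ++ PySem.Int.toStr k], acc.2 + 1)
            (runs.dropLast ++ [(s, k)])
          have hemit2 : emitA s e = [", " ++ "r" ++ PySem.Int.toStr s] ++
              [(if e = s + 1 then ", " ++ "r" ++ PySem.Int.toStr e
                else "-" ++ "r" ++ PySem.Int.toStr e)] := by
            simp only [emitA]
            rw [if_neg hes]
            by_cases h21 : e = s + 1
            · rw [if_pos h21, if_pos h21]; rfl
            · rw [if_neg h21, if_neg h21]; rfl
          refine ⟨?_, ?_, ?_⟩
          · rw [h1, hdl, hre]
            simp only [List.flatMap_append, List.flatMap_cons, List.flatMap_nil,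
              List.append_nil]
            rw [hemit2, ← List.append_assoc, List.dropLast_concat]
            have hb2 : emitA s k = [", " ++ "r" ++ PySem.Int.toStr s,
                "-" ++ "r" ++ PySem.Int.toStr k] := by
              simp only [emitA]
              rw [if_neg (show ¬ k = s by omega),
                if_neg (show ¬ k = s + 1 by omega)]
            rw [hb2]
            simp
          · intro r hr
            rw [hdl] at hr
            rcases List.mem_append.mp hr with hr | hr
            · have := hmem' r hr; exact ⟨this.1, by omega⟩
            · simp at hr; subst hr; exact ⟨by omega, by omega⟩
          · show acc.2 + 1 = _
            simp only [List.getLast?_concat]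
            rw [if_pos (show k = k + 1 - 1 by omega)]
            omega
      · -- previous run does not touch bit k-1: state = 0, a new run starts
        have hbne : ¬ ((e == k - 1) = true) := by simpa using he
        have hstv : acc.2 = 0 := by rw [hst, if_neg he]
        have hgt : ¬ acc.2 > 1 := by omega
        rw [if_neg hbne, if_neg hgt, if_neg hgt]
        show LoopInv (k + 1) (acc.1 ++ [", " ++ "r" ++ PySem.Int.toStr k], acc.2 + 1)
          (runs ++ [(k, k)])
        refine ⟨?_, ?_, ?_⟩
        · rw [h1]
          simp only [List.flatMap_append, List.flatMap_cons, List.flatMap_nil,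
            List.append_nil]
          congr 1
          simp [emitA]
        · intro r hr
          rcases List.mem_append.mp hr with hr | hr
          · have := h2 r hr; exact ⟨this.1, by omega⟩
          · simp at hr; subst hr; exact ⟨by omega, by omega⟩
        · show acc.2 + 1 = _
          simp only [List.getLast?_concat]
          rw [if_pos (show k = k + 1 - 1 by omega)]
          omega
  · -- bit k is not set
    rw [if_neg hb, if_neg hb]
    show LoopInv (k + 1) (acc.1, 0) runs
    refine ⟨h1, ?_, ?_⟩
    · intro r hr; have := h2 r hr; exact ⟨this.1, by omega⟩
    · cases hl : runs.getLast? with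
      | none => show (0 : Int) = _; simp [hl]
      | some se =>
        obtain ⟨l', hre⟩ := List.getLast?_eq_some_iff.mp hl
        have hse := h2 se (by rw [hre]; simp)
        show (0 : Int) = _
        simp only [hl]
        rw [if_neg (show ¬ se.2 = k + 1 - 1 by omega)]

lemma fold_inv (number : Int) (n : Nat) : ∀ (k : Int) (acc : List String × Int)
    (runs : List (Int × Int)), LoopInv k acc runs →
    LoopInv (k + n) ((PySem.List.pyRange k (k + n) 1).foldl (rlistStepA number) acc)
      ((PySem.List.pyRange k (k + n) 1).foldl (rlistRunsStep number) runs) := by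
  induction n with
  | zero =>
    intro k acc runs h
    rw [PySem.List.pyRange_one_eq_nil (show k + ((0 : Nat) : Int) ≤ k by simp)]
    simpa using h
  | succ m ih =>
    intro k acc runs h
    rw [PySem.List.pyRange_one_cons
      (show k < k + ((m + 1 : Nat) : Int) by push_cast; omega)]
    simp only [List.foldl_cons]
    have h' := step_inv number k acc runs h
    have hb : k + (((m + 1) : Nat) : Int) = (k + 1) + (m : Nat) := by push_cast; ring
    rw [hb]
    exact ih (k + 1) _ _ h'

lemma toList_ofList (l : List Char) : (String.ofList l).toList = l :=
  String.toList_ofList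

lemma str_eq_of_toList {a b : String} (h : a.toList = b.toList) : a = b :=
  String.toList_inj.mp h

lemma toList_join_empty (ts : List String) :
    (PySem.Str.join "" ts).toList = (ts.map String.toList).flatten := by
  induction ts with
  | nil => simp [PySem.Str.join, PySem.Chars.join_nil]
  | cons t ts ih =>
    cases ts with
    | nil => simp [PySem.Str.join, PySem.Chars.join_singleton]
    | cons u us =>
      simp only [PySem.Str.join, List.map_cons, toList_ofList] at ih ⊢
      rw [PySem.Chars.join_cons_cons]
      simp only [List.flatten_cons] at ih ⊢
      rw [ih]
      simp

lemma chars_join_sep (t : List Char) (ts : List (List Char)) :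
    PySem.Chars.join (", ".toList) (t :: ts) =
      t ++ (ts.map (fun u => ", ".toList ++ u)).flatten := by
  induction ts generalizing t with
  | nil => simp [PySem.Chars.join_singleton]
  | cons u us ih =>
    rw [PySem.Chars.join_cons_cons, ih u]
    simp

lemma toList_join_sep (t : String) (ts : List String) :
    (PySem.Str.join ", " (t :: ts)).toList =
      t.toList ++ ((ts.map (fun u => (", " ++ u).toList)).flatten) := by
  simp only [PySem.Str.join, List.map_cons, toList_ofList]
  rw [chars_join_sep]
  congr 1
  rw [List.map_map]
  simp [Function.comp_def, String.toList_append]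

lemma perRun (s e : Int) (hle : s ≤ e) :
    ((emitA s e).map String.toList).flatten =
      ((rlistToken s e).map (fun u => (", " ++ u).toList)).flatten := by
  by_cases h1 : e = s
  · subst h1
    have ha : emitA e e = [", " ++ "r" ++ PySem.Int.toStr e] := by
      rw [emitA, if_pos rfl]
    have hc : rlistToken e e = ["r" ++ PySem.Int.toStr e] := by
      rw [rlistToken, if_neg (show ¬ e - e + 1 ≥ 3 by omega),
        PySem.List.pyRange_one_singleton, List.map_singleton]
    rw [ha, hc]
    simp [String.toList_append]
  · by_cases h2 : e = s + 1
    · subst h2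
      have ha : emitA s (s + 1) = [", " ++ "r" ++ PySem.Int.toStr s,
          ", " ++ "r" ++ PySem.Int.toStr (s + 1)] := by
        rw [emitA, if_neg (show ¬ s + 1 = s by omega), if_pos rfl]
      have hr2 : PySem.List.pyRange s (s + 1 + 1) 1 = [s, s + 1] := by
        rw [PySem.List.pyRange_one_cons (show s < s + 1 + 1 by omega),
          PySem.List.pyRange_one_singleton]
      have hc : rlistToken s (s + 1) = ["r" ++ PySem.Int.toStr s,
          "r" ++ PySem.Int.toStr (s + 1)] := by
        rw [rlistToken, if_neg (show ¬ s + 1 - s + 1 ≥ 3 by omega), hr2]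
        rfl
      rw [ha, hc]
      simp [String.toList_append]
    · have ha : emitA s e = [", " ++ "r" ++ PySem.Int.toStr s,
          "-" ++ "r" ++ PySem.Int.toStr e] := by
        rw [emitA, if_neg h1, if_neg h2]
      have hc : rlistToken s e = ["r" ++ PySem.Int.toStr s ++ "-r" ++
          PySem.Int.toStr e] := by
        rw [rlistToken, if_pos (show e - s + 1 ≥ 3 by omega)]
      have hdash : ("-r" : String).toList = "-".toList ++ "r".toList := by decide
      rw [ha, hc]
      simp [String.toList_append, hdash]

lemma flatten_emit_eq (runs : List (Int × Int)) (hb : ∀ r ∈ runs, r.1 ≤ r.2) :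
    ((runs.flatMap (fun r => emitA r.1 r.2)).map String.toList).flatten =
      ((runs.flatMap (fun r => rlistToken r.1 r.2)).map
        (fun u => (", " ++ u).toList)).flatten := by
  induction runs with
  | nil => simp
  | cons r rest ih =>
    simp only [List.flatMap_cons, List.map_append, List.flatten_append]
    rw [perRun r.1 r.2 (hb r (by simp)), ih (fun x hx => hb x (by simp [hx]))]

lemma token_ne_nil (s e : Int) (hle : s ≤ e) : rlistToken s e ≠ [] := by
  rw [rlistToken]
  by_cases h : e - s + 1 ≥ 3
  · rw [if_pos h]; simp
  · rw [if_neg h, PySem.List.pyRange_one_cons (show s < e + 1 by omega)]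
    simp

lemma foldl_tokens (runs : List (Int × Int)) :
    runs.foldl (fun toks r => toks ++ rlistToken r.1 r.2) [] =
      runs.flatMap (fun r => rlistToken r.1 r.2) := by
  simpa using PySem.List.foldl_append_eq_flatMap (fun r => rlistToken r.1 r.2) runs []

lemma inv_init : LoopInv 0 ([], 0) [] := ⟨by simp, by simp, by simp⟩

-- ===== VERDICT (by name: the statement is the Claim_ definition above) =====
theorem rlist_spec : Claim_equal_rlist := by
  intro number _
  unfold Spec_rlist rlist rlist_alt
  have h16 := fold_inv number 16 0 ([], 0) [] inv_init
  norm_num at h16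
  rw [foldl_tokens]
  generalize hR : (PySem.List.pyRange 0 16 1).foldl (rlistRunsStep number) [] = runs at h16 ⊢
  generalize hA : (PySem.List.pyRange 0 16 1).foldl (rlistStepA number) ([], 0) = accA at h16 ⊢
  obtain ⟨h1, h2, -⟩ := h16
  have hbnd : ∀ r ∈ runs, r.1 ≤ r.2 := fun r hr => (h2 r hr).1
  rw [h1]
  cases hruns : runs with
  | nil => decide
  | cons r0 rest =>
    have hne : runs.flatMap (fun r => rlistToken r.1 r.2) ≠ [] := by
      rw [hruns]
      simp only [List.flatMap_cons, ne_eq, List.append_eq_nil_iff, not_and]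
      intro hc
      exact absurd hc (token_ne_nil r0.1 r0.2 (hbnd r0 (by rw [hruns]; simp)))
    obtain ⟨t, ts, hts⟩ := List.exists_cons_of_ne_nil hne
    rw [← hruns, hts]
    have hflat := flatten_emit_eq runs hbnd
    rw [hts] at hflat
    apply str_eq_of_toList
    have hslice : ∀ (x : String), (PySem.Str.slice x (some 2) none).toList
        = x.toList.drop 2 := by
      intro x
      simp [PySem.Str.slice, PySem.List.slice_from]
    have hcl : (", " : String).toList = [',', ' '] := by decide
    rw [hslice, toList_join_empty, hflat, toList_join_sep]
    simp [String.toList_append, hcl]
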